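-- pv_equiv track=rewrite | github.com/paulsmythev/tetris-soft-eng-3815ict | game_page/controller.py | analyse_board
-- ===== SOURCE A (Python) =====
-- def analyse_board(board, depth):
--     # Add the piece depth to the score
--     score = depth
--     # Reduce the score by 2 for each empty slot with a full slot somewhere ebove it
--     for row in range (0, len(board)):
--         for column in range(0, len(board[row])):
--             if board[row][column] == 0:
--                 above = row
--                 while above >= 0:
--                     if board[above][column] != 0:
--                         score -= 2
--                         break
--                     above -= 1
--     # Reduce the score by 1 for every 3 or more deep cavern on the far left
--     gap_size = 0
--     for row in range(len(board)-1, 0, -1):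
--         if board[row][0] != 0 or board[row][1] == 0:
--             gap_size = 0
--         if board[row][0] == 0 and board[row][1] != 0:
--             gap_size += 1
--         if gap_size >= 3:
--             score -= 1
--
--     # Reduce the score by 1 for every 3 or more deep cavern on the far right
--     gap_size = 0
--     for row in range(len(board)-1, 0, -1):
--         if board[row][len(board[row])-1] != 0 or board[row][len(board[row])-2] == 0:
--             gap_size = 0
--         if board[row][len(board[row])-1] == 0 and board[row][len(board[row])-2] != 0:
--             gap_size += 1
--         if gap_size >= 3:
--             score -= 1
--
--     # Reduce the score by 1 for every 3 or more deep cavern in all othe columns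
--     for column in range(1, len(board[0])-1):
--         gap_size = 0
--         for row in range(len(board)-1, 0, -1):
--             if board[row][column] != 0 or board[row][column-1] == 0 or board[row][column+1] == 0:
--                 gap_size = 0
--             if board[row][column] == 0 and board[row][column-1] != 0 and board[row][column+1] != 0:
--                 gap_size += 1
--             if gap_size >= 3:
--                 score -= 1
--
--     # Return the calculated score
--     return score
-- ===== SOURCE B (Python) =====
-- def analyse_board(board, depth):
--     score = depth
--     rows = len(board)
--     cols = len(board[0])
--     # Holes: one top-down pass per column, remembering whether a filled cell was seen above.
--     for c in range(cols):
--         seen = False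
--         for r in range(rows):
--             if board[r][c] != 0:
--                 seen = True
--             elif seen:
--                 score -= 2
--     # Caverns: one bottom-up pass per column with a unified neighbour rule.
--     for c in range(cols):
--         run = 0
--         for r in range(rows - 1, 0, -1):
--             if (board[r][c] == 0
--                     and (c == 0 or board[r][c - 1] != 0)
--                     and (c == cols - 1 or board[r][c + 1] != 0)):
--                 run += 1
--                 if run >= 3:
--                     score -= 1
--             else:
--                 run = 0
--     return score
-- ===== Notes on version B (the rewrite author's own statement) =====
-- stated objective: simpler
-- what changed: Hole counting becomes one top-down pass per column carrying a 'seen a filled cell above' flag instead of re-scanning all rows above every empty cell, and the three separate cavern loops (left edge, right edge, middle) are unified into one per-column bottom-up pass with a single neighbour rule.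
-- outside the precondition, e.g. on analyse_board([[0]], 0): A returns 0, B returns 0; on analyse_board([[0], [1]], 3): A returns 3, B returns 3; on analyse_board([[1, 1], [1]], 0): A returns 0, B raises IndexError
import Mathlib
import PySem

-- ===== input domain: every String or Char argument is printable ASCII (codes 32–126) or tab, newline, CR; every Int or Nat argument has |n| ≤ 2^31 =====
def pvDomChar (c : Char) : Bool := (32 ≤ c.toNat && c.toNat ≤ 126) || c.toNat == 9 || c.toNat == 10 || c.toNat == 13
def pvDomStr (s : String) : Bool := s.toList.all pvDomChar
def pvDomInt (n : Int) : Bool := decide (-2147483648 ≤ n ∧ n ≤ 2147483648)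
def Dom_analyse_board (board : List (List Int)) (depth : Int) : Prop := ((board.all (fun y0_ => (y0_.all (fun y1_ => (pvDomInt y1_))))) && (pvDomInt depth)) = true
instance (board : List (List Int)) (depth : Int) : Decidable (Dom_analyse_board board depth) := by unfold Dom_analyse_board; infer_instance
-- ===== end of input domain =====

-- B replaces A's per-cell upward re-scan for holes by one flagged top-down pass per column and
-- merges A's three cavern loops into one per-column pass with a single neighbour rule (simpler).


-- ===== PORT A =====
-- board[r][c] with default 0 (indices always in range on Pre_)
def pvCell (board : List (List Int)) (r c : Int) : Int :=
  PySem.List.pyGetD (PySem.List.pyGetD board r []) c 0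

-- len(board[r])
def pvRowLen (board : List (List Int)) (r : Int) : Int :=
  ((PySem.List.pyGetD board r []).length : Int)

-- A's inner `while above >= 0` hole scan: fuel a+1 checks rows a, a-1, …, 0;
-- returns true iff the `break` (filled cell found) is hit.
def pvScanA (board : List (List Int)) (c : Int) : Nat → Bool
  | 0 => false
  | a + 1 => if pvCell board (a : Int) c != 0 then true else pvScanA board c a

def analyse_board (board : List (List Int)) (depth : Int) : Int :=
  let score := depth
  -- holes: for each empty cell, scan every row above it
  let score := (PySem.List.pyRange 0 (board.length : Int) 1).foldl (fun score row =>
    (PySem.List.pyRange 0 (pvRowLen board row) 1).foldl (fun score column =>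
      if pvCell board row column == 0 then
        (if pvScanA board column (row.toNat + 1) then score - 2 else score)
      else score) score) score
  let rows := PySem.List.pyRange ((board.length : Int) - 1) 0 (-1)
  -- caverns on the far left
  let score := (rows.foldl (fun (st : Int × Int) row =>
      let g := if pvCell board row 0 != 0 || pvCell board row 1 == 0 then 0 else st.1
      let g := if pvCell board row 0 == 0 && pvCell board row 1 != 0 then g + 1 else g
      (g, if g ≥ 3 then st.2 - 1 else st.2)) (0, score)).2
  -- caverns on the far right
  let score := (rows.foldl (fun (st : Int × Int) row =>
      let g := if pvCell board row (pvRowLen board row - 1) != 0 || pvCell board row (pvRowLen board row - 2) == 0 then 0 else st.1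
      let g := if pvCell board row (pvRowLen board row - 1) == 0 && pvCell board row (pvRowLen board row - 2) != 0 then g + 1 else g
      (g, if g ≥ 3 then st.2 - 1 else st.2)) (0, score)).2
  -- caverns in all other columns
  let score := (PySem.List.pyRange 1 (pvRowLen board 0 - 1) 1).foldl (fun score column =>
    (rows.foldl (fun (st : Int × Int) row =>
      let g := if pvCell board row column != 0 || pvCell board row (column - 1) == 0 || pvCell board row (column + 1) == 0 then 0 else st.1
      let g := if pvCell board row column == 0 && pvCell board row (column - 1) != 0 && pvCell board row (column + 1) != 0 then g + 1 else g
      (g, if g ≥ 3 then st.2 - 1 else st.2)) (0, score)).2) score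
  score

-- ===== PORT B =====
def analyse_board_alt (board : List (List Int)) (depth : Int) : Int :=
  let rows : Int := (board.length : Int)
  let cols : Int := pvRowLen board 0
  -- holes: one top-down pass per column with a `seen` flag
  let score := (PySem.List.pyRange 0 cols 1).foldl (fun score c =>
    ((PySem.List.pyRange 0 rows 1).foldl (fun (st : Bool × Int) r =>
      if pvCell board r c != 0 then (true, st.2)
      else if st.1 then (st.1, st.2 - 2) else st) (false, score)).2) depth
  -- caverns: one bottom-up pass per column with a unified neighbour rule
  let score := (PySem.List.pyRange 0 cols 1).foldl (fun score c =>
    ((PySem.List.pyRange (rows - 1) 0 (-1)).foldl (fun (st : Int × Int) r =>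
      if pvCell board r c == 0 && (c == 0 || pvCell board r (c - 1) != 0)
          && (c == cols - 1 || pvCell board r (c + 1) != 0) then
        (st.1 + 1, if st.1 + 1 ≥ 3 then st.2 - 1 else st.2)
      else (0, st.2)) (0, score)).2) score
  score

-- ===== PRECONDITION & SPEC =====
-- Pre_ restricts to the natural domain of the scorer: a non-empty rectangular board at
-- least two columns wide. Outside it A raises IndexError on most inputs; on the remaining
-- degenerate shapes (one-column or ragged boards surviving via short-circuiting or
-- negative-index wraparound) A's value is an accident of evaluation order, and is not
-- claimed here even where B happens to agree with it.
def Pre_analyse_board (board : List (List Int)) (_depth : Int) : Prop :=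
  board ≠ [] ∧ 2 ≤ board.headI.length ∧ ∀ row ∈ board, row.length = board.headI.length
instance (board : List (List Int)) (depth : Int) : Decidable (Pre_analyse_board board depth) := by
  unfold Pre_analyse_board; infer_instance

def pvWitness_analyse_board : List (List Int) × Int := ([[0, 0], [1, 1], [0, 1]], 3)

def Spec_analyse_board (board : List (List Int)) (depth : Int) (out : Int) : Prop := out = analyse_board_alt board depth
instance (board : List (List Int)) (depth : Int) (out : Int) : Decidable (Spec_analyse_board board depth out) := by unfold Spec_analyse_board; infer_instance

-- ===== CLAIM (what is proved, stated in full; the proofs are below) =====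
def Claim_equal_analyse_board : Prop := ∀ (board : List (List Int)) (depth : Int), Dom_analyse_board board depth → Pre_analyse_board board depth → Spec_analyse_board board depth (analyse_board board depth)


-- ===== LEMMAS AND PROOFS =====

-- generic: a fold that only subtracts
theorem pv_foldl_sub {a : Type} (l : List a) (g : a → Int) (s : Int) :
    l.foldl (fun sc x => sc - g x) s = s - (l.map g).sum := by
  induction l generalizing s with
  | nil => simp
  | cons x t ih => simp only [List.foldl_cons, List.map_cons, List.sum_cons, ih]; ring

-- generic: exchange a double sum over two lists
theorem pv_sum_swap {a b : Type} (l1 : List a) (l2 : List b) (f : a → b → Int) :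
    (l1.map (fun x => (l2.map (fun y => f x y)).sum)).sum
      = (l2.map (fun y => (l1.map (fun x => f x y)).sum)).sum := by
  induction l1 with
  | nil => simp
  | cons x t ih =>
    simp only [List.map_cons, List.sum_cons, ih, ← PySem.List.sum_map_add_int]

-- the unified cavern-cell test of B (m = number of columns)
def pvQ (board : List (List Int)) (m c r : Int) : Bool :=
  pvCell board r c == 0 && (c == 0 || pvCell board r (c - 1) != 0)
    && (c == m - 1 || pvCell board r (c + 1) != 0)

-- one cavern step
def pvStep (q : Int → Bool) (st : Int × Int) (r : Int) : Int × Int :=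
  if q r then (st.1 + 1, if st.1 + 1 ≥ 3 then st.2 - 1 else st.2) else (0, st.2)

-- penalty accumulated by a cavern pass starting with gap g
def pvPen (q : Int → Bool) : Int → List Int → Int
  | _, [] => 0
  | g, r :: l =>
    (if q r then (if g + 1 ≥ 3 then (1 : Int) else 0) else 0)
      + pvPen q (if q r then g + 1 else 0) l

-- final gap of a cavern pass
def pvGap (q : Int → Bool) : Int → List Int → Int
  | g, [] => g
  | g, r :: l => pvGap q (if q r then g + 1 else 0) l

theorem pv_foldl_step (q : Int → Bool) (l : List Int) (g s : Int) :
    l.foldl (pvStep q) (g, s) = (pvGap q g l, s - pvPen q g l) := by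
  induction l generalizing g s with
  | nil => simp [pvGap, pvPen]
  | cons r t ih =>
    simp only [List.foldl_cons, pvStep, pvGap, pvPen]
    by_cases hq : q r
    · simp only [hq, if_true]
      by_cases h3 : g + 1 ≥ 3
      · simp only [h3, if_true, ih]; ring_nf
      · simp only [h3, if_false, ih]; ring_nf
    · simp only [hq, Bool.false_eq_true, if_false, ih]; ring_nf

-- hole indicator (2 per hole): the cell is empty and some cell strictly above is filled
def pvHoleInd (board : List (List Int)) (c r : Int) : Int :=
  if pvCell board r c == 0 && pvScanA board c r.toNat then 2 else 0

theorem pv_scan_succ (board : List (List Int)) (c : Int) (j : Nat)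
    (h : pvCell board (j : Int) c = 0) :
    pvScanA board c (j + 1) = pvScanA board c j := by
  simp [pvScanA, h]

-- B's hole pass over one column, characterised
theorem pv_B_inner (board : List (List Int)) (c s : Int) (j : Nat) :
    (PySem.List.pyRange 0 (j : Int) 1).foldl
        (fun (st : Bool × Int) r =>
          if pvCell board r c != 0 then (true, st.2)
          else if st.1 then (st.1, st.2 - 2) else st) (false, s)
      = (pvScanA board c j,
          s - ((List.range j).map (fun (k : Nat) => pvHoleInd board c (k : Int))).sum) := by
  induction j with
  | zero => simp [PySem.List.pyRange_one_eq_nil (by omega : (0:Int) ≤ 0), pvScanA]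
  | succ j ih =>
    have hc : ((j + 1 : Nat) : Int) = (j : Int) + 1 := by push_cast; ring
    rw [hc, PySem.List.pyRange_one_succ_right (by positivity), List.foldl_append, ih]
    simp only [List.foldl_cons, List.foldl_nil, List.range_succ, List.map_append,
      List.map_cons, List.map_nil, List.sum_append, List.sum_cons, List.sum_nil]
    by_cases h : pvCell board (j : Int) c = 0
    · rw [pv_scan_succ board c j h]
      simp only [pvHoleInd, h, bne_self_eq_false]
      by_cases hs : pvScanA board c j
      · simp [hs]; ring
      · simp [hs]
    · have hb : (pvCell board (j : Int) c != 0) = true := by simp [bne, h]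
      simp only [hb, if_true, pvScanA, pvHoleInd]
      simp [h]

-- counting holes of one row the way A does equals summing the indicator
theorem pv_A_inner (board : List (List Int)) (m r s : Int) (hr : 0 ≤ r) :
    (PySem.List.pyRange 0 m 1).foldl
        (fun sc column =>
          if pvCell board r column == 0 then
            (if pvScanA board column (r.toNat + 1) then sc - 2 else sc)
          else sc) s
      = s - ((PySem.List.pyRange 0 m 1).map (fun c => pvHoleInd board c r)).sum := by
  rw [PySem.List.foldl_congr_mem _ _ (fun sc c => sc - pvHoleInd board c r) _ ?_]
  · exact pv_foldl_sub _ _ _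
  · intro sc c _
    have hrr : ((r.toNat : Nat) : Int) = r := Int.toNat_of_nonneg hr
    by_cases h : pvCell board r c = 0
    · have h' : pvCell board ((r.toNat : Nat) : Int) c = 0 := by rw [hrr]; exact h
      rw [show pvScanA board c (r.toNat + 1) = pvScanA board c r.toNat from pv_scan_succ board c r.toNat h']
      by_cases hs : pvScanA board c r.toNat
      · simp [pvHoleInd, h, hs]
      · simp [pvHoleInd, h, hs]
    · simp [pvHoleInd, h]



-- abbreviations for the board's shape
def pvM (board : List (List Int)) : Int := pvRowLen board 0
def pvRows (board : List (List Int)) : List Int :=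
  PySem.List.pyRange ((board.length : Int) - 1) 0 (-1)

-- B, characterised: depth minus the hole sum minus the cavern penalties, column by column
theorem pv_B_eq (board : List (List Int)) (depth : Int) :
    analyse_board_alt board depth =
      depth
        - ((PySem.List.pyRange 0 (pvM board) 1).map (fun c =>
            ((List.range board.length).map (fun (k : Nat) => pvHoleInd board c (k : Int))).sum)).sum
        - ((PySem.List.pyRange 0 (pvM board) 1).map (fun c =>
            pvPen (pvQ board (pvM board) c) 0 (pvRows board))).sum := by
  simp only [analyse_board_alt]
  have hB1 : ∀ s : Int,
      List.foldl (fun score c =>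
          (List.foldl (fun (st : Bool × Int) r =>
              if pvCell board r c != 0 then (true, st.2)
              else if st.1 then (st.1, st.2 - 2) else st)
            (false, score) (PySem.List.pyRange 0 (board.length : Int) 1)).2)
        s (PySem.List.pyRange 0 (pvRowLen board 0) 1)
      = s - ((PySem.List.pyRange 0 (pvM board) 1).map (fun c =>
              ((List.range board.length).map (fun (k : Nat) => pvHoleInd board c (k : Int))).sum)).sum := by
    intro s
    exact Eq.trans
      (PySem.List.foldl_congr_mem _ _
        (fun sc c => sc - ((List.range board.length).map (fun (k : Nat) => pvHoleInd board c (k : Int))).sum) s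
        (fun sc c _ => congrArg Prod.snd (pv_B_inner board c sc board.length)))
      (pv_foldl_sub _ _ s)
  have hB2 : ∀ s : Int,
      List.foldl (fun score c =>
          (List.foldl (fun (st : Int × Int) r =>
              if pvCell board r c == 0 && (c == 0 || pvCell board r (c - 1) != 0)
                  && (c == pvRowLen board 0 - 1 || pvCell board r (c + 1) != 0) then
                (st.1 + 1, if st.1 + 1 ≥ 3 then st.2 - 1 else st.2)
              else (0, st.2))
            (0, score) (PySem.List.pyRange ((board.length : Int) - 1) 0 (-1))).2)
        s (PySem.List.pyRange 0 (pvRowLen board 0) 1)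
      = s - ((PySem.List.pyRange 0 (pvM board) 1).map (fun c =>
              pvPen (pvQ board (pvM board) c) 0 (pvRows board))).sum := by
    intro s
    exact Eq.trans
      (PySem.List.foldl_congr_mem _ _
        (fun sc c => sc - pvPen (pvQ board (pvM board) c) 0 (pvRows board)) s
        (fun sc c _ => congrArg Prod.snd (pv_foldl_step (pvQ board (pvM board) c) (pvRows board) 0 sc)))
      (pv_foldl_sub _ _ s)
  rw [hB1, hB2]

-- A, characterised (on a rectangular board at least two columns wide)
theorem pv_A_eq (board : List (List Int)) (depth : Int)
    (h2 : 2 ≤ pvM board)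
    (hrect : ∀ r : Int, 0 ≤ r → r < (board.length : Int) → pvRowLen board r = pvM board) :
    analyse_board board depth =
      depth
        - ((PySem.List.pyRange 0 (board.length : Int) 1).map (fun row =>
            ((PySem.List.pyRange 0 (pvM board) 1).map (fun c => pvHoleInd board c row)).sum)).sum
        - pvPen (pvQ board (pvM board) 0) 0 (pvRows board)
        - pvPen (pvQ board (pvM board) (pvM board - 1)) 0 (pvRows board)
        - ((PySem.List.pyRange 1 (pvM board - 1) 1).map (fun col =>
            pvPen (pvQ board (pvM board) col) 0 (pvRows board))).sum := by
  have hM0 : ((0 : Int) == pvM board - 1) = false := by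
    simp only [beq_eq_false_iff_ne, ne_eq]; omega
  simp only [analyse_board]
  have hS1 : ∀ s : Int,
      List.foldl (fun score row =>
          List.foldl (fun score column =>
              if pvCell board row column == 0 then
                if pvScanA board column (row.toNat + 1) then score - 2 else score
              else score)
            score (PySem.List.pyRange 0 (pvRowLen board row) 1))
        s (PySem.List.pyRange 0 (board.length : Int) 1)
      = s - ((PySem.List.pyRange 0 (board.length : Int) 1).map (fun row =>
              ((PySem.List.pyRange 0 (pvM board) 1).map (fun c => pvHoleInd board c row)).sum)).sum := by
    intro s
    refine Eq.trans (PySem.List.foldl_congr_mem _ _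
      (fun sc row => sc - ((PySem.List.pyRange 0 (pvM board) 1).map (fun c => pvHoleInd board c row)).sum) s ?_)
      (pv_foldl_sub _ _ s)
    intro sc row hrow
    rw [PySem.List.mem_pyRange_one] at hrow
    rw [show pvRowLen board row = pvM board from hrect row hrow.1 hrow.2]
    exact pv_A_inner board (pvM board) row sc hrow.1
  have hS2 : ∀ s : Int,
      (List.foldl (fun (st : Int × Int) row =>
          (if pvCell board row 0 == 0 && pvCell board row 1 != 0 then
              (if pvCell board row 0 != 0 || pvCell board row 1 == 0 then 0 else st.1) + 1
            else if pvCell board row 0 != 0 || pvCell board row 1 == 0 then 0 else st.1,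
            if (if pvCell board row 0 == 0 && pvCell board row 1 != 0 then
                  (if pvCell board row 0 != 0 || pvCell board row 1 == 0 then 0 else st.1) + 1
                else if pvCell board row 0 != 0 || pvCell board row 1 == 0 then 0 else st.1) ≥ 3 then
              st.2 - 1
            else st.2))
        (0, s) (PySem.List.pyRange ((board.length : Int) - 1) 0 (-1))).2
      = s - pvPen (pvQ board (pvM board) 0) 0 (pvRows board) := by
    intro s
    refine Eq.trans (congrArg Prod.snd (PySem.List.foldl_congr_mem _ _
      (pvStep (pvQ board (pvM board) 0)) (0, s) ?_)) (by rw [pv_foldl_step]; rfl)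
    intro st row _
    by_cases hx : pvCell board row 0 = 0 <;> by_cases hy : pvCell board row 1 = 0 <;>
      simp [pvStep, pvQ, hx, hy, hM0]
  have hS3 : ∀ s : Int,
      (List.foldl (fun (st : Int × Int) row =>
          (if pvCell board row (pvRowLen board row - 1) == 0 && pvCell board row (pvRowLen board row - 2) != 0 then
              (if pvCell board row (pvRowLen board row - 1) != 0 || pvCell board row (pvRowLen board row - 2) == 0 then 0 else st.1) + 1
            else if pvCell board row (pvRowLen board row - 1) != 0 || pvCell board row (pvRowLen board row - 2) == 0 then 0 else st.1,
            if (if pvCell board row (pvRowLen board row - 1) == 0 && pvCell board row (pvRowLen board row - 2) != 0 then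
                  (if pvCell board row (pvRowLen board row - 1) != 0 || pvCell board row (pvRowLen board row - 2) == 0 then 0 else st.1) + 1
                else if pvCell board row (pvRowLen board row - 1) != 0 || pvCell board row (pvRowLen board row - 2) == 0 then 0 else st.1) ≥ 3 then
              st.2 - 1
            else st.2))
        (0, s) (PySem.List.pyRange ((board.length : Int) - 1) 0 (-1))).2
      = s - pvPen (pvQ board (pvM board) (pvM board - 1)) 0 (pvRows board) := by
    intro s
    refine Eq.trans (congrArg Prod.snd (PySem.List.foldl_congr_mem _ _
      (pvStep (pvQ board (pvM board) (pvM board - 1))) (0, s) ?_)) (by rw [pv_foldl_step]; rfl)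
    intro st row hr
    rw [PySem.List.mem_pyRange_neg_one] at hr
    rw [show pvRowLen board row = pvM board from hrect row (by omega) (by omega)]
    have hM1 : ((pvM board - 1 : Int) == 0) = false := by
      simp only [beq_eq_false_iff_ne, ne_eq]; omega
    by_cases hx : pvCell board row (pvM board - 1) = 0 <;>
      by_cases hy : pvCell board row (pvM board - 2) = 0 <;>
      simp [pvStep, pvQ, hx, hy, hM1,
        show pvM board - 1 - 1 = pvM board - 2 by ring]
  have hS4 : ∀ s : Int,
      List.foldl (fun score column =>
          (List.foldl (fun (st : Int × Int) row =>
              (if pvCell board row column == 0 && pvCell board row (column - 1) != 0 && pvCell board row (column + 1) != 0 then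
                  (if pvCell board row column != 0 || pvCell board row (column - 1) == 0 || pvCell board row (column + 1) == 0 then 0 else st.1) + 1
                else if pvCell board row column != 0 || pvCell board row (column - 1) == 0 || pvCell board row (column + 1) == 0 then 0 else st.1,
                if (if pvCell board row column == 0 && pvCell board row (column - 1) != 0 && pvCell board row (column + 1) != 0 then
                      (if pvCell board row column != 0 || pvCell board row (column - 1) == 0 || pvCell board row (column + 1) == 0 then 0 else st.1) + 1
                    else if pvCell board row column != 0 || pvCell board row (column - 1) == 0 || pvCell board row (column + 1) == 0 then 0 else st.1) ≥ 3 then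
                  st.2 - 1
                else st.2))
            (0, score) (PySem.List.pyRange ((board.length : Int) - 1) 0 (-1))).2)
        s (PySem.List.pyRange 1 (pvRowLen board 0 - 1) 1)
      = s - ((PySem.List.pyRange 1 (pvM board - 1) 1).map (fun col =>
              pvPen (pvQ board (pvM board) col) 0 (pvRows board))).sum := by
    intro s
    refine Eq.trans (PySem.List.foldl_congr_mem _ _
      (fun sc col => sc - pvPen (pvQ board (pvM board) col) 0 (pvRows board)) s ?_)
      (pv_foldl_sub _ _ s)
    intro sc col hcol
    rw [show pvRowLen board 0 - 1 = pvM board - 1 from rfl] at hcol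
    rw [PySem.List.mem_pyRange_one] at hcol
    refine Eq.trans (congrArg Prod.snd (PySem.List.foldl_congr_mem _ _
      (pvStep (pvQ board (pvM board) col)) (0, sc) ?_)) (by rw [pv_foldl_step]; rfl)
    intro st row _
    have hc0 : ((col : Int) == 0) = false := by
      simp only [beq_eq_false_iff_ne, ne_eq]; omega
    have hcM : ((col : Int) == pvM board - 1) = false := by
      simp only [beq_eq_false_iff_ne, ne_eq]; omega
    by_cases hx : pvCell board row col = 0 <;>
      by_cases hy : pvCell board row (col - 1) = 0 <;>
      by_cases hz : pvCell board row (col + 1) = 0 <;>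
      simp [pvStep, pvQ, hx, hy, hz, hc0, hcM]
  rw [hS1, hS2, hS3, hS4]

-- ===== VERDICT (by name: the statement is the Claim_ definition above) =====
theorem analyse_board_spec : Claim_equal_analyse_board := by
  intro board depth _ hPre
  obtain ⟨hne, hm2, hrect⟩ := hPre
  have hM : pvM board = (board.headI.length : Int) := by
    cases board with
    | nil => exact absurd rfl hne
    | cons h t => simp [pvM, pvRowLen, PySem.List.pyGetD_zero_cons, List.headI]
  have h2 : 2 ≤ pvM board := by rw [hM]; exact_mod_cast hm2
  have hrect' : ∀ r : Int, 0 ≤ r → r < (board.length : Int) → pvRowLen board r = pvM board := by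
    intro r hr0 hrn
    have hlt : r.toNat < board.length := by omega
    have hget : PySem.List.pyGetD board r [] = board[r.toNat] :=
      PySem.List.pyGetD_eq_getElem board [] hr0 (by exact_mod_cast hrn)
    rw [pvRowLen, hget, hM]
    exact_mod_cast hrect board[r.toNat] (List.getElem_mem hlt)
  show analyse_board board depth = analyse_board_alt board depth
  rw [pv_A_eq board depth h2 hrect', pv_B_eq board depth]
  have hholes :
      ((PySem.List.pyRange 0 (board.length : Int) 1).map (fun row =>
          ((PySem.List.pyRange 0 (pvM board) 1).map (fun c => pvHoleInd board c row)).sum)).sum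
        = ((PySem.List.pyRange 0 (pvM board) 1).map (fun c =>
            ((List.range board.length).map (fun (k : Nat) => pvHoleInd board c (k : Int))).sum)).sum := by
    rw [PySem.List.pyRange_zero_nat board.length, List.map_map]
    simp only [Function.comp_def]
    exact pv_sum_swap (List.range board.length) (PySem.List.pyRange 0 (pvM board) 1)
      (fun (k : Nat) (c : Int) => pvHoleInd board c (k : Int))
  have hsplit :
      ((PySem.List.pyRange 0 (pvM board) 1).map (fun c =>
          pvPen (pvQ board (pvM board) c) 0 (pvRows board))).sum
        = pvPen (pvQ board (pvM board) 0) 0 (pvRows board)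
          + ((PySem.List.pyRange 1 (pvM board - 1) 1).map (fun col =>
              pvPen (pvQ board (pvM board) col) 0 (pvRows board))).sum
          + pvPen (pvQ board (pvM board) (pvM board - 1)) 0 (pvRows board) := by
    rw [PySem.List.pyRange_one_cons (by omega : (0 : Int) < pvM board),
        show (0 : Int) + 1 = 1 from by norm_num,
        PySem.List.pyRange_one_append 1 (pvM board - 1) (pvM board) (by omega) (by omega),
        show PySem.List.pyRange (pvM board - 1) (pvM board) 1
            = [pvM board - 1] from by
          have h := PySem.List.pyRange_one_singleton (pvM board - 1)
          rwa [show pvM board - 1 + 1 = pvM board by ring] at h]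
    simp only [List.map_cons, List.map_append, List.sum_cons, List.sum_append,
      List.map_nil, List.sum_nil]
    ring
  rw [hholes, hsplit]
  ring
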